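-- pv_equiv track=rewrite | github.com/SquirmyWormy275/Missoula-Pro-Am-Manager | services/heat_generator.py | _move_partial_heats_to_end
-- ===== SOURCE A (Python) =====
-- def _move_partial_heats_to_end(heats: list, sizes: list, max_per_heat: int) -> tuple[list, dict[int, int]]:
--     """Reorder heats so any short/partial-fill heats run AFTER the full ones.
--
--     Convention (user rule, 2026-04-22): when a field doesn't divide evenly into
--     the heat size (e.g. odd N with 2-up stock saw), the leftover competitor or
--     partial heat closes out the event rather than starting it. Snake-draft on
--     its own leaves the partial in heat 0 because the second pass turns around
--     early; this reorders heat 0 to the end of the list while preserving the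
--     relative order of the other heats so the skill mix is unchanged.
--
--     `sizes` is parallel to `heats` and reports the *capacity-relevant* fill
--     count for each heat — stand-units for partnered events, competitor count
--     otherwise — so the partial check matches the generator's own bookkeeping.
--
--     Returns `(reordered_heats, old_to_new)` where `old_to_new[i]` is the new
--     index of what used to be heat `i`. Identity mapping when no reorder runs
--     (single heat, all-partial, all-full, or any heat over capacity — the last
--     case being intentional springboard LH overflow that must stay pinned to
--     the final heat).
--
--     Callers MUST use `old_to_new` to remap any side-channel data that carries
--     pre-reorder heat indices (gear_violations, lh_warnings) — otherwise those
--     warnings end up pointing at the wrong heat after the reorder.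
--     """
--     identity = {i: i for i in range(len(heats))}
--     if len(heats) <= 1:
--         return heats, identity
--     if any(s > max_per_heat for s in sizes):
--         return heats, identity
--     full_idx = [i for i, s in enumerate(sizes) if s >= max_per_heat]
--     partial_idx = [i for i, s in enumerate(sizes) if s < max_per_heat]
--     if not partial_idx or not full_idx:
--         return heats, identity
--     new_order = full_idx + partial_idx
--     old_to_new = {old: new for new, old in enumerate(new_order)}
--     return [heats[i] for i in new_order], old_to_new
-- ===== SOURCE B (Python) =====
-- def _move_partial_heats_to_end(heats: list, sizes: list, max_per_heat: int) -> tuple[list, dict[int, int]]: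
--     """Reorder heats so partial-fill heats run after the full ones.
--
--     Same guards as the original; the reorder itself is a single stable sort of
--     the index range with a shifted key (partial indices are pushed past n), so
--     full heats keep their relative order, then partial heats keep theirs.
--     """
--     identity = {i: i for i in range(len(heats))}
--     if len(heats) <= 1 or any(s > max_per_heat for s in sizes):
--         return heats, identity
--     if all(s < max_per_heat for s in sizes) or all(s >= max_per_heat for s in sizes):
--         return heats, identity
--     n = len(sizes)
--     new_order = sorted(range(n), key=lambda i: i + n if sizes[i] < max_per_heat else i)
--     return [heats[i] for i in new_order], {old: new for new, old in enumerate(new_order)}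
-- ===== Notes on version B (the rewrite author's own statement) =====
-- stated objective: alternative
-- what changed: The two partition comprehensions and their concatenation are replaced by one stable sort of the index range with a shifted key (partial indices offset by n), which yields full-then-partial order directly; guards are kept.
import Mathlib
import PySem

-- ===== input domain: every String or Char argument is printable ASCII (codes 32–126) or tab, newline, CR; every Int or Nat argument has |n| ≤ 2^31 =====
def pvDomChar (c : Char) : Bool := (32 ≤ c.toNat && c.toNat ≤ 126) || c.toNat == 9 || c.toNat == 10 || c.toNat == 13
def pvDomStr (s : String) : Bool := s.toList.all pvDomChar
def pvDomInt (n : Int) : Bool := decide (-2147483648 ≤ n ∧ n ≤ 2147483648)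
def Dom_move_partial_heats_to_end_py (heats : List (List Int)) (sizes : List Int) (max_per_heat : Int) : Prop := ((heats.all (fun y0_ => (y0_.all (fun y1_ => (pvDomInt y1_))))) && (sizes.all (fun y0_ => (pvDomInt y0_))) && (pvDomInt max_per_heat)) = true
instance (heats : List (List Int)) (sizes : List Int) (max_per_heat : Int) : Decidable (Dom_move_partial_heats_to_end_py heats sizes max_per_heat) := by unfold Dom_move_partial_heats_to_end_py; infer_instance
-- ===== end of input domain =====

-- ===== PORT A =====
-- B differs from A by one stable sort of the index range with a shifted key in place of the
-- two partition comprehensions; same guards, same return value (alternative decomposition).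
def move_partial_heats_to_end_py (heats : List (List Int)) (sizes : List Int) (max_per_heat : Int) : List (List Int) × (List (Int × Int)) :=
  let identity := (List.range heats.length).map (fun i => ((i : Int), (i : Int)))
  if heats.length ≤ 1 then (heats, identity)
  else if sizes.any (fun s => max_per_heat < s) then (heats, identity)
  else
    let full_idx := ((PySem.List.enumerate sizes).filter (fun p => max_per_heat ≤ p.2)).map (fun p => p.1)
    let partial_idx := ((PySem.List.enumerate sizes).filter (fun p => p.2 < max_per_heat)).map (fun p => p.1)
    if partial_idx = [] ∨ full_idx = [] then (heats, identity)
    else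
      let new_order := full_idx ++ partial_idx
      (new_order.map (fun i => PySem.List.pyGetD heats i []),
       (PySem.List.enumerate new_order).map (fun p => (p.2, p.1)))

-- ===== PORT B =====
def move_partial_heats_to_end_py_alt (heats : List (List Int)) (sizes : List Int) (max_per_heat : Int) : List (List Int) × (List (Int × Int)) :=
  let identity := (List.range heats.length).map (fun i => ((i : Int), (i : Int)))
  if heats.length ≤ 1 ∨ sizes.any (fun s => max_per_heat < s) then (heats, identity)
  else if sizes.all (fun s => s < max_per_heat) ∨ sizes.all (fun s => max_per_heat ≤ s) then (heats, identity)
  else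
    let n : Int := sizes.length
    let new_order := PySem.List.sorted (PySem.List.pyRange 0 n)
      (fun i => if PySem.List.pyGetD sizes i 0 < max_per_heat then i + n else i) false
    (new_order.map (fun i => PySem.List.pyGetD heats i []),
     (PySem.List.enumerate new_order).map (fun p => (p.2, p.1)))

-- ===== PRECONDITION & SPEC =====
-- Pre_ excludes exactly the inputs on which Python A raises IndexError: the reorder branch is
-- reached (len > 1, no heat over capacity, both a partial and a full heat exist) but sizes is
-- longer than heats, so heats[i] is indexed out of range.  (B raises there too.)
def Pre_move_partial_heats_to_end_py (heats : List (List Int)) (sizes : List Int) (max_per_heat : Int) : Prop :=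
  ¬ (1 < heats.length ∧ heats.length < sizes.length ∧
     (∀ s ∈ sizes, s ≤ max_per_heat) ∧ (∃ s ∈ sizes, s < max_per_heat) ∧ (∃ s ∈ sizes, max_per_heat ≤ s))
instance (heats : List (List Int)) (sizes : List Int) (max_per_heat : Int) : Decidable (Pre_move_partial_heats_to_end_py heats sizes max_per_heat) := by unfold Pre_move_partial_heats_to_end_py; infer_instance
def pvWitness_move_partial_heats_to_end_py : List (List Int) × List Int × Int := ([[1], [2]], [2, 1], 2)
def Spec_move_partial_heats_to_end_py (heats : List (List Int)) (sizes : List Int) (max_per_heat : Int) (out : List (List Int) × (List (Int × Int))) : Prop := out = move_partial_heats_to_end_py_alt heats sizes max_per_heat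
instance (heats : List (List Int)) (sizes : List Int) (max_per_heat : Int) (out : List (List Int) × (List (Int × Int))) : Decidable (Spec_move_partial_heats_to_end_py heats sizes max_per_heat out) := by unfold Spec_move_partial_heats_to_end_py; infer_instance

-- ===== CLAIM (what is proved, stated in full; the proofs are below) =====
def Claim_equal_move_partial_heats_to_end_py : Prop := ∀ (heats : List (List Int)) (sizes : List Int) (max_per_heat : Int), Dom_move_partial_heats_to_end_py heats sizes max_per_heat → Pre_move_partial_heats_to_end_py heats sizes max_per_heat → Spec_move_partial_heats_to_end_py heats sizes max_per_heat (move_partial_heats_to_end_py heats sizes max_per_heat)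

-- ===== LEMMAS AND PROOFS =====

-- Every element of A's full_idx is a valid index with a full size.
theorem mem_full_idx {sizes : List Int} {m i : Int}
    (h : i ∈ ((PySem.List.enumerate sizes).filter (fun p => m ≤ p.2)).map (fun p => p.1)) :
    0 ≤ i ∧ i < sizes.length ∧ ¬ PySem.List.pyGetD sizes i 0 < m := by
  obtain ⟨p, hp, rfl⟩ := List.mem_map.mp h
  obtain ⟨hmem, hfull⟩ := List.mem_filter.mp hp
  obtain ⟨k, hk, rfl⟩ := (PySem.List.mem_enumerate_iff sizes 0 p).mp hmem
  simp only [zero_add] at *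
  refine ⟨by positivity, by exact_mod_cast hk, ?_⟩
  rw [PySem.List.pyGetD_natCast, List.getD_eq_getElem _ _ hk]
  simpa using hfull

-- Every element of A's partial_idx is a valid index with a partial size.
theorem mem_partial_idx {sizes : List Int} {m i : Int}
    (h : i ∈ ((PySem.List.enumerate sizes).filter (fun p => p.2 < m)).map (fun p => p.1)) :
    0 ≤ i ∧ i < sizes.length ∧ PySem.List.pyGetD sizes i 0 < m := by
  obtain ⟨p, hp, rfl⟩ := List.mem_map.mp h
  obtain ⟨hmem, hpart⟩ := List.mem_filter.mp hp
  obtain ⟨k, hk, rfl⟩ := (PySem.List.mem_enumerate_iff sizes 0 p).mp hmem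
  simp only [zero_add] at *
  refine ⟨by positivity, by exact_mod_cast hk, ?_⟩
  rw [PySem.List.pyGetD_natCast, List.getD_eq_getElem _ _ hk]
  simpa using hpart

-- The indices extracted from a filtered enumeration are strictly increasing.
theorem pairwise_lt_filter_map (sizes : List Int) (q : Int × Int → Bool) :
    (((PySem.List.enumerate sizes).filter q).map (fun p => p.1)).Pairwise (· < ·) := by
  exact List.pairwise_map.mpr ((PySem.List.pairwise_lt_enumerate sizes 0).filter q)

-- B's stable sort of range(n) with the shifted key equals A's full_idx ++ partial_idx.
theorem sorted_eq_partition (sizes : List Int) (m : Int) :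
    PySem.List.sorted (PySem.List.pyRange 0 (sizes.length : Int))
      (fun i => if PySem.List.pyGetD sizes i 0 < m then i + (sizes.length : Int) else i) false
    = ((PySem.List.enumerate sizes).filter (fun p => m ≤ p.2)).map (fun p => p.1)
      ++ ((PySem.List.enumerate sizes).filter (fun p => p.2 < m)).map (fun p => p.1) := by
  apply PySem.List.sorted_eq_of_perm_of_pairwise_lt
  · -- permutation with range(n)
    have hfc : (PySem.List.enumerate sizes).filter (fun p => p.2 < m)
        = (PySem.List.enumerate sizes).filter (fun p => !(fun p : Int × Int => decide (m ≤ p.2)) p) := by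
      apply List.filter_congr
      intro p _
      simp only [← decide_not, decide_eq_decide]
      omega
    rw [hfc, ← List.map_append]
    have := (List.filter_append_perm (fun p : Int × Int => m ≤ p.2) (PySem.List.enumerate sizes)).map (fun p => p.1)
    rw [PySem.List.map_fst_enumerate] at this
    simpa using this
  · -- strictly increasing shifted keys
    rw [List.pairwise_append]
    refine ⟨?_, ?_, ?_⟩
    · apply (pairwise_lt_filter_map sizes _).imp_of_mem
      intro a b ha hb hab
      have h1 := mem_full_idx ha
      have h2 := mem_full_idx hb
      simp only [if_neg h1.2.2, if_neg h2.2.2]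
      exact hab
    · apply (pairwise_lt_filter_map sizes _).imp_of_mem
      intro a b ha hb hab
      have h1 := mem_partial_idx ha
      have h2 := mem_partial_idx hb
      simp only [if_pos h1.2.2, if_pos h2.2.2]
      omega
    · intro a ha b hb
      have h1 := mem_full_idx ha
      have h2 := mem_partial_idx hb
      simp only [if_neg h1.2.2, if_pos h2.2.2]
      omega

-- A's third guard matches B's all-partial / all-full test.
theorem partial_idx_eq_nil_iff (sizes : List Int) (m : Int) :
    ((PySem.List.enumerate sizes).filter (fun p => p.2 < m)).map (fun p => p.1) = []
    ↔ sizes.all (fun s => m ≤ s) = true := by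
  simp only [List.map_eq_nil_iff, List.filter_eq_nil_iff, List.all_eq_true]
  constructor
  · intro h s hs
    obtain ⟨k, hk, rfl⟩ := List.mem_iff_getElem.mp hs
    have := h ((k : Int), sizes[k]) ((PySem.List.mem_enumerate_iff sizes 0 _).mpr ⟨k, hk, by simp⟩)
    simpa using this
  · intro h p hp
    obtain ⟨k, hk, rfl⟩ := (PySem.List.mem_enumerate_iff sizes 0 p).mp hp
    simpa using h sizes[k] (List.getElem_mem hk)

theorem full_idx_eq_nil_iff (sizes : List Int) (m : Int) :
    ((PySem.List.enumerate sizes).filter (fun p => m ≤ p.2)).map (fun p => p.1) = []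
    ↔ sizes.all (fun s => s < m) = true := by
  simp only [List.map_eq_nil_iff, List.filter_eq_nil_iff, List.all_eq_true]
  constructor
  · intro h s hs
    obtain ⟨k, hk, rfl⟩ := List.mem_iff_getElem.mp hs
    have := h ((k : Int), sizes[k]) ((PySem.List.mem_enumerate_iff sizes 0 _).mpr ⟨k, hk, by simp⟩)
    simpa using this
  · intro h p hp
    obtain ⟨k, hk, rfl⟩ := (PySem.List.mem_enumerate_iff sizes 0 p).mp hp
    simpa using h sizes[k] (List.getElem_mem hk)

-- The two ports agree on every input (Pre_ only excludes inputs where the Pythons raise;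
-- the ports themselves agree unconditionally).
theorem ports_agree (heats : List (List Int)) (sizes : List Int) (m : Int) :
    move_partial_heats_to_end_py heats sizes m = move_partial_heats_to_end_py_alt heats sizes m := by
  unfold move_partial_heats_to_end_py move_partial_heats_to_end_py_alt
  by_cases h1 : heats.length ≤ 1
  · simp [h1]
  · by_cases h2 : sizes.any (fun s => m < s) = true
    · simp [h1, h2]
    · rw [if_neg h1, if_neg h2,
        if_neg (by simp [h1, h2] : ¬(heats.length ≤ 1 ∨ sizes.any (fun s => m < s) = true))]
      by_cases h3 : ((PySem.List.enumerate sizes).filter (fun p => p.2 < m)).map (fun p => p.1) = []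
          ∨ ((PySem.List.enumerate sizes).filter (fun p => m ≤ p.2)).map (fun p => p.1) = []
      · rw [if_pos h3, if_pos]
        rcases h3 with h3 | h3
        · exact Or.inr ((partial_idx_eq_nil_iff sizes m).mp h3)
        · exact Or.inl ((full_idx_eq_nil_iff sizes m).mp h3)
      · have hg2 : ¬(sizes.all (fun s => s < m) = true ∨ sizes.all (fun s => m ≤ s) = true) := by
          rw [not_or] at h3 ⊢
          exact ⟨fun c => h3.2 ((full_idx_eq_nil_iff sizes m).mpr c),
                 fun c => h3.1 ((partial_idx_eq_nil_iff sizes m).mpr c)⟩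
        rw [if_neg h3, if_neg hg2]
        simp only [sorted_eq_partition sizes m]

-- ===== VERDICT (by name: the statement is the Claim_ definition above) =====
theorem move_partial_heats_to_end_py_spec : Claim_equal_move_partial_heats_to_end_py := by
  intro heats sizes m _ _
  unfold Spec_move_partial_heats_to_end_py
  exact ports_agree heats sizes m
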